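-- pv_equiv track=rewrite | github.com/Jungjaewon/leetcode_solve | 2042-check-if-numbers-are-ascending-in-a-sentence/2042-check-if-numbers-are-ascending-in-a-sentence.py | areNumbersAscending
-- ===== SOURCE A (Python) =====
-- def areNumbersAscending(s: str) -> bool:
--     """
--     a_l = [ int(w) for w in s.split() if w.isdigit()]
--     return a_l == sorted(a_l) if len(set(a_l)) != 1 and not len(set(a_l)) < len(a_l) else False
--     """
--     """
--     a_l = [ int(w) for w in s.split() if w.isdigit()]
--     for idx, n in enumerate(a_l[:-1]):
--         if not a_l[idx] < a_l[idx + 1]: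
--             return False
--     return True
--     """
--     base = -1
--     for idx, n in enumerate([int(w) for w in s.split() if w.isdigit()]):
--         if not base < n:
--             return False
--         else:
--             base = n
--     return True
-- ===== SOURCE B (Python) =====
-- def areNumbersAscending(s: str) -> bool:
--     a_l = [int(w) for w in s.split() if w.isdigit()]
--     return a_l == sorted(a_l) and len(set(a_l)) == len(a_l)
-- ===== Notes on version B (the rewrite author's own statement) =====
-- stated objective: simpler
-- what changed: Replaces the early-exit linear scan with a running previous value by extracting the numbers once and testing strict ascent declaratively: the list equals its sorted form and all values are distinct (set size).
import Mathlib
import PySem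

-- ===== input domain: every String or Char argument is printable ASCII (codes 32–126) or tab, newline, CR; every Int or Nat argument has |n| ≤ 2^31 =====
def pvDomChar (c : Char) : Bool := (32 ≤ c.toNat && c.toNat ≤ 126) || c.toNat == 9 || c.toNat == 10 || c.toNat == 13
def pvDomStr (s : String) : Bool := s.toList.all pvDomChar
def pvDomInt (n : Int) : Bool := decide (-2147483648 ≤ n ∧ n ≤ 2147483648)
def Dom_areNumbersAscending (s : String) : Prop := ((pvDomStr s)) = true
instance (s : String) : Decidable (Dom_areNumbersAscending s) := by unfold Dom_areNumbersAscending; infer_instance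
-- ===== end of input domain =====

-- B replaces A's early-exit scan with a running previous value by a declarative check:
-- the extracted numbers equal their sorted form and are all distinct (objective: simpler).


-- ===== PORT A =====
-- the 'for …: if not base < n: return False else: base = n' loop, early exit kept
def pvLoopA : Int → List Int → Bool
  | _, [] => true
  | base, n :: rest => if ¬ base < n then false else pvLoopA n rest

-- [int(w) for w in s.split() if w.isdigit()]; on the ASCII domain a w with w.isdigit()
-- is a nonempty run of '0'-'9', so int(w) succeeds: ofStr? is some there and .getD 0 is exact
def areNumbersAscending (s : String) : Bool :=
  pvLoopA (-1)
    (((PySem.Str.split₀ s).filter PySem.Str.strIsdigit).map (fun w => (PySem.Int.ofStr? w).getD 0))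

-- ===== PORT B =====
def areNumbersAscending_alt (s : String) : Bool :=
  let a_l := ((PySem.Str.split₀ s).filter PySem.Str.strIsdigit).map (fun w => (PySem.Int.ofStr? w).getD 0)
  decide (a_l = PySem.List.sorted a_l (fun x => x) false) && ((PySem.Set.ofList a_l).length == a_l.length)

-- ===== PRECONDITION & SPEC =====
def Spec_areNumbersAscending (s : String) (out : Bool) : Prop := out = areNumbersAscending_alt s
instance (s : String) (out : Bool) : Decidable (Spec_areNumbersAscending s out) := by unfold Spec_areNumbersAscending; infer_instance

-- ===== CLAIM (what is proved, stated in full; the proofs are below) =====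
def Claim_equal_areNumbersAscending : Prop := ∀ (s : String), Dom_areNumbersAscending s → Spec_areNumbersAscending s (areNumbersAscending s)

-- ===== LEMMAS AND PROOFS =====

lemma digit_not_intSpace (c : Char) (h : PySem.Chars.isdigit c = true) :
    PySem.Int.isIntSpace c = false := by
  simp only [PySem.Chars.isdigit, Bool.and_eq_true, decide_eq_true_eq] at h
  simp only [PySem.Int.isIntSpace, Bool.or_eq_false_iff, decide_eq_false_iff_not]
  refine ⟨⟨⟨⟨⟨?_, ?_⟩, ?_⟩, ?_⟩, ?_⟩, ?_⟩ <;> rintro rfl <;> revert h <;> decide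

lemma dropWhile_intSpace_of_digits (l : List Char)
    (h : ∀ x ∈ l, PySem.Chars.isdigit x = true) :
    List.dropWhile PySem.Int.isIntSpace l = l := by
  cases l with
  | nil => rfl
  | cons a t =>
    rw [List.dropWhile_cons_of_neg]
    simp [digit_not_intSpace a (h a (by simp))]

lemma bind_natCast_nonneg (o : Option Nat) :
    0 ≤ (Option.map (fun n : Int => n) (o.bind fun a => pure ((a : Nat) : Int))).getD 0 := by
  cases o <;> simp

lemma ofChars_digits_nonneg (cs : List Char)
    (h : PySem.Chars.strIsdigit cs = true) :
    0 ≤ (PySem.Int.ofChars? cs).getD 0 := by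
  simp only [PySem.Chars.strIsdigit, Bool.and_eq_true, List.all_eq_true,
    Bool.not_eq_true', List.isEmpty_eq_false_iff] at h
  obtain ⟨hne, hall⟩ := h
  have h1 : List.dropWhile PySem.Int.isIntSpace cs = cs :=
    dropWhile_intSpace_of_digits cs hall
  have h2 : List.dropWhile PySem.Int.isIntSpace cs.reverse = cs.reverse :=
    dropWhile_intSpace_of_digits cs.reverse (by intro x hx; exact hall x (List.mem_reverse.mp hx))
  unfold PySem.Int.ofChars?
  rw [h1, h2, List.reverse_reverse]
  cases cs with
  | nil => exact absurd rfl hne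
  | cons c t =>
    have hc : PySem.Chars.isdigit c = true := hall c (by simp)
    dsimp only
    split
    · next ds heq =>
      have hcm : c = '-' := ((List.cons_eq_cons.mp heq.symm).1).symm
      rw [hcm] at hc
      exact absurd hc (by decide)
    · next ds heq =>
      have hcp : c = '+' := ((List.cons_eq_cons.mp heq.symm).1).symm
      rw [hcp] at hc
      exact absurd hc (by decide)
    · exact bind_natCast_nonneg _

lemma pvLoopA_eq_true_iff (b : Int) (l : List Int) :
    pvLoopA b l = true ↔ List.IsChain (· < ·) (b :: l) := by
  induction l generalizing b with
  | nil => simp [pvLoopA]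
  | cons n rest ih =>
    rw [List.isChain_cons_cons]
    simp only [pvLoopA]
    by_cases hb : b < n
    · simp [hb, ih]
    · simp [hb]

lemma length_ofList_eq_iff_nodup (l : List Int) :
    (PySem.Set.ofList l).length = l.length ↔ l.Nodup := by
  constructor
  · intro hlen
    have hnd : (PySem.Set.ofList l).Nodup := PySem.Set.nodup_ofList l
    have hsub : (PySem.Set.ofList l : List Int) ⊆ l := by
      intro x hx; exact (PySem.Set.mem_ofList l x).mp hx
    have hsp : List.Subperm (PySem.Set.ofList l) l := List.Nodup.subperm hnd hsub
    have hperm : List.Perm (PySem.Set.ofList l) l :=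
      hsp.perm_of_length_le (le_of_eq hlen.symm)
    exact hperm.nodup hnd
  · intro hnd
    rw [PySem.Set.ofList_eq_self_of_nodup l hnd]

lemma pairwise_lt_iff (l : List Int) :
    l.Pairwise (· < ·) ↔
      (l = PySem.List.sorted l (fun x => x) false ∧ (PySem.Set.ofList l).length = l.length) := by
  constructor
  · intro hp
    have hle : l.Pairwise (fun a b : Int => a ≤ b) := hp.imp le_of_lt
    refine ⟨(PySem.List.sorted_eq_self_of_pairwise l (fun x => x) hle).symm, ?_⟩
    exact (length_ofList_eq_iff_nodup l).mpr (List.Pairwise.imp ne_of_lt hp)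
  · rintro ⟨hs, hlen⟩
    have hnd : l.Nodup := (length_ofList_eq_iff_nodup l).mp hlen
    have hle : l.Pairwise (fun a b : Int => a ≤ b) := by
      rw [hs]
      exact PySem.List.sorted_pairwise _ _
    exact (hle.and hnd).imp (fun h => lt_of_le_of_ne h.1 h.2)

lemma main_list_lemma (l : List Int) (h : ∀ x ∈ l, 0 ≤ x) :
    pvLoopA (-1) l =
      (decide (l = PySem.List.sorted l (fun x => x) false) &&
        ((PySem.Set.ofList l).length == l.length)) := by
  rw [Bool.eq_iff_iff, pvLoopA_eq_true_iff, List.isChain_iff_pairwise, List.pairwise_cons]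
  simp only [Bool.and_eq_true, decide_eq_true_eq, beq_iff_eq]
  rw [← pairwise_lt_iff]
  constructor
  · exact fun hp => hp.2
  · intro hp
    exact ⟨fun x hx => lt_of_lt_of_le (by norm_num) (h x hx), hp⟩

-- ===== VERDICT (by name: the statement is the Claim_ definition above) =====
theorem areNumbersAscending_spec : Claim_equal_areNumbersAscending := by
  intro s _
  unfold Spec_areNumbersAscending areNumbersAscending areNumbersAscending_alt
  apply main_list_lemma
  intro x hx
  simp only [List.mem_map, List.mem_filter] at hx
  obtain ⟨w, ⟨_, hd⟩, rfl⟩ := hx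
  have : PySem.Chars.strIsdigit w.toList = true := by
    rw [← PySem.Str.strIsdigit_eq]; exact hd
  have := ofChars_digits_nonneg w.toList this
  simpa [PySem.Int.ofStr?] using this
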